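-- pv_equiv track=rewrite | github.com/xuqinyongxiansheng/kairos-system | src/kairos/services/auto_classifier/__init__.py | _build_transcript
-- ===== SOURCE A (Python) =====
-- from typing import Dict, Any, Optional, List, Set
--
-- def _build_transcript(messages: List[Dict[str, str]], max_length: int = 4000) -> str:
--     """将对话历史压缩为紧凑格式供分类器使用"""
--     lines = []
--     total_len = 0
--     for msg in reversed(messages):
--         role = msg.get("role", "unknown")
--         content = msg.get("content", "")
--         if role == "user":
--             prefix = "User"
--         elif role == "assistant":
--             prefix = "Asst"
--         elif role in ("tool", "tool_result"):
--             prefix = "Tool"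
--         else:
--             prefix = "Sys"
--         line = f"{prefix}: {content[:200]}"
--         if total_len + len(line) > max_length:
--             break
--         lines.insert(0, line)
--         total_len += len(line)
--     return "\n".join(lines)
-- ===== SOURCE B (Python) =====
-- _PREFIX = {"user": "User", "assistant": "Asst", "tool": "Tool", "tool_result": "Tool"}
--
-- def _format_line(msg):
--     return _PREFIX.get(msg.get("role", "unknown"), "Sys") + ": " + msg.get("content", "")[:200]
--
-- def _build_transcript(messages, max_length=4000):
--     lines = [_format_line(m) for m in messages]
--     # cums[k] = total length of the k newest lines
--     cums = [0]
--     for line in reversed(lines):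
--         cums.append(cums[-1] + len(line))
--     # binary search for the largest k with cums[k] <= max_length; line lengths
--     # are nonnegative so cums is nondecreasing and this k equals the
--     # stop-at-first-overflow count of kept newest lines
--     lo, hi = 0, len(lines)
--     while lo < hi:
--         mid = (lo + hi + 1) // 2
--         if cums[mid] <= max_length:
--             lo = mid
--         else:
--             hi = mid - 1
--     return "\n".join(lines[len(lines) - lo:])
-- ===== Notes on version B (the rewrite author's own statement) =====
-- stated objective: alternative
-- what changed: B precomputes all formatted lines and a cumulative-length (prefix-sum) array over the reversed lines, then finds the number of newest lines that fit by BINARY SEARCH on that nondecreasing array (correct because line lengths are nonnegative, so the first-overflow break point equals the largest k whose suffix sum fits), and joins that suffix slice; A is one fused reverse loop that formats, accumulates and breaks.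
import Mathlib
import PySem

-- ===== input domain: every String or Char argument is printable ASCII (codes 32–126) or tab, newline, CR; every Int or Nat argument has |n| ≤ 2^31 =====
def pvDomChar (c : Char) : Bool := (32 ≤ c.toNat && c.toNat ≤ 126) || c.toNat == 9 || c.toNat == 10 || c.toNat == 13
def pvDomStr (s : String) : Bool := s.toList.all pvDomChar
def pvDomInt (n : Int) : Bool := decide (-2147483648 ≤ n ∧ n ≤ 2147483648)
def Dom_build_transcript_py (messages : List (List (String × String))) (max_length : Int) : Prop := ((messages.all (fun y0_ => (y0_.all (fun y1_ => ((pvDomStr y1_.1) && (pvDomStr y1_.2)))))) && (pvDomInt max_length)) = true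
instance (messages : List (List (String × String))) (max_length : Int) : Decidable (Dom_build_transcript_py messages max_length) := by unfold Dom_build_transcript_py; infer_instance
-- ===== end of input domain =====

-- B replaces A's fused reverse format-and-break loop by: format all lines, build the
-- prefix-sum array of lengths of the reversed lines, binary-search the largest suffix
-- that fits, and join that slice; same return value, a different algorithm.

-- ===== PORT A =====
-- A's loop over reversed(messages): formats each message in place, breaks on overflow,
-- prepends with lines.insert(0, line) and tracks total_len.
def btLoopA : List (List (String × String)) → Int → Int → List String → List String
  | [], _, _, lines => lines
  | msg :: rest, maxL, total, lines =>
    let role := PySem.Dict.getD (PySem.Dict.mk msg) "role" "unknown"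
    let content := PySem.Dict.getD (PySem.Dict.mk msg) "content" ""
    let pfx := if role = "user" then "User"
      else if role = "assistant" then "Asst"
      else if role = "tool" ∨ role = "tool_result" then "Tool"
      else "Sys"
    let line := pfx ++ ": " ++ PySem.Str.slice content none (some 200)
    if total + PySem.Str.len line > maxL then lines
    else btLoopA rest maxL (total + PySem.Str.len line) (PySem.List.insert lines 0 line)

def build_transcript_py (messages : List (List (String × String))) (max_length : Int) : String :=
  PySem.Str.join "\n" (btLoopA messages.reverse max_length 0 [])

-- ===== PORT B =====
-- B's prefix table and per-message formatter (_PREFIX / _format_line in Source B).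
def btPrefixTable : PySem.Dict String String :=
  PySem.Dict.ofList [("user", "User"), ("assistant", "Asst"), ("tool", "Tool"), ("tool_result", "Tool")]

def btFormatLine (msg : List (String × String)) : String :=
  PySem.Dict.getD btPrefixTable (PySem.Dict.getD (PySem.Dict.mk msg) "role" "unknown") "Sys"
    ++ ": " ++ PySem.Str.slice (PySem.Dict.getD (PySem.Dict.mk msg) "content" "") none (some 200)

-- B's prefix-sum loop: 'cums.append(cums[-1] + len(line))' over reversed(lines),
-- ported with the running total carried explicitly (cums[-1] is always that total).
def btCumsLoop : List String → Int → List Int → List Int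
  | [], _, cums => cums
  | l :: rest, total, cums =>
      btCumsLoop rest (total + PySem.Str.len l) (cums ++ [total + PySem.Str.len l])

-- B's while-loop binary search for the largest k with cums[k] <= max_length.
-- lo/hi/mid are nonnegative in Python, so Nat with Nat division is exact;
-- cums[mid] is always in range (1 <= mid <= len(lines) < len(cums)), ported as getD.
def btSearch (cums : List Int) (maxL : Int) (lo hi : Nat) : Nat :=
  if lo < hi then
    let mid := (lo + hi + 1) / 2
    if cums.getD mid 0 ≤ maxL then btSearch cums maxL mid hi
    else btSearch cums maxL lo (mid - 1)
  else lo
termination_by hi - lo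
decreasing_by all_goals omega

def build_transcript_py_alt (messages : List (List (String × String))) (max_length : Int) : String :=
  let lines := messages.map btFormatLine
  let cums := btCumsLoop lines.reverse 0 [0]
  let keep := btSearch cums max_length 0 lines.length
  PySem.Str.join "\n" (lines.drop (lines.length - keep))

-- ===== PRECONDITION & SPEC =====
def Spec_build_transcript_py (messages : List (List (String × String))) (max_length : Int) (out : String) : Prop := out = build_transcript_py_alt messages max_length
instance (messages : List (List (String × String))) (max_length : Int) (out : String) : Decidable (Spec_build_transcript_py messages max_length out) := by unfold Spec_build_transcript_py; infer_instance

-- ===== CLAIM (what is proved, stated in full; the proofs are below) =====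
def Claim_equal_build_transcript_py : Prop := ∀ (messages : List (List (String × String))) (max_length : Int), Dom_build_transcript_py messages max_length → Spec_build_transcript_py messages max_length (build_transcript_py messages max_length)

-- ===== LEMMAS AND PROOFS =====

-- Proof-side helper: the number of newest lines A keeps (its break condition, abstracted).
def btKeep : List String → Int → Int → Nat
  | [], _, _ => 0
  | line :: rest, maxL, total =>
    if total + PySem.Str.len line > maxL then 0
    else 1 + btKeep rest maxL (total + PySem.Str.len line)

-- Proof-side helper: total length of the first k lines of rev.
def btSum (rev : List String) (k : Nat) : Int := ((rev.take k).map PySem.Str.len).sum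

-- A's inline role→prefix if-chain computes the same line as B's table lookup.
theorem btFormatLine_eq (msg : List (String × String)) :
    btFormatLine msg =
      (let role := PySem.Dict.getD (PySem.Dict.mk msg) "role" "unknown"
       let content := PySem.Dict.getD (PySem.Dict.mk msg) "content" ""
       let pfx := if role = "user" then "User"
         else if role = "assistant" then "Asst"
         else if role = "tool" ∨ role = "tool_result" then "Tool"
         else "Sys"
       pfx ++ ": " ++ PySem.Str.slice content none (some 200)) := by
  simp only [btFormatLine]
  congr 2
  generalize PySem.Dict.getD (PySem.Dict.mk msg) "role" "unknown" = role
  by_cases h1 : role = "user"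
  · subst h1; decide
  · by_cases h2 : role = "assistant"
    · subst h2; decide
    · by_cases h3 : role = "tool"
      · subst h3; decide
      · by_cases h4 : role = "tool_result"
        · subst h4; decide
        · rw [if_neg h1, if_neg h2,
            if_neg (by simp [h3, h4] : ¬(role = "tool" ∨ role = "tool_result"))]
          rw [show btPrefixTable = PySem.Dict.mk
              [("user", "User"), ("assistant", "Asst"), ("tool", "Tool"), ("tool_result", "Tool")] from rfl,
            PySem.Dict.getD_eq_get?_getD]
          simp only [PySem.Dict.get?_mk_cons, beq_iff_eq]
          rw [if_neg (fun h => h1 h.symm), if_neg (fun h => h2 h.symm),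
            if_neg (fun h => h3 h.symm), if_neg (fun h => h4 h.symm)]
          rfl

-- A's loop builds exactly the (reversed) mapped prefix of length btKeep, in front of lines.
theorem btLoopA_eq (rs : List (List (String × String))) (maxL total : Int) (lines : List String) :
    btLoopA rs maxL total lines =
      ((rs.take (btKeep (rs.map btFormatLine) maxL total)).map btFormatLine).reverse ++ lines := by
  induction rs generalizing total lines with
  | nil => simp [btLoopA, btKeep]
  | cons msg rest ih =>
    rw [btLoopA, List.map_cons, btKeep]
    rw [← btFormatLine_eq msg]
    by_cases h : maxL < total + PySem.Str.len (btFormatLine msg)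
    · rw [if_pos h, if_pos h]
      simp
    · rw [if_neg h, if_neg h, ih, PySem.List.insert_zero, Nat.add_comm, List.take_succ_cons]
      simp

theorem btSum_zero (rev : List String) : btSum rev 0 = 0 := rfl

theorem btSum_cons (l : List String) (a : String) (k : Nat) :
    btSum (a :: l) (k + 1) = PySem.Str.len a + btSum l k := by
  simp [btSum, List.take_succ_cons]

theorem btSum_mono (rev : List String) {j k : Nat} (h : j ≤ k) :
    btSum rev j ≤ btSum rev k := by
  have : btSum rev k = btSum rev j + (((rev.drop j).take (k - j)).map PySem.Str.len).sum := by
    rw [btSum, btSum, show k = j + (k - j) by omega, List.take_add]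
    simp
  rw [this]
  have hnn : 0 ≤ (((rev.drop j).take (k - j)).map PySem.Str.len).sum := by
    apply List.sum_nonneg
    intro x hx
    rcases List.mem_map.mp hx with ⟨s, _, rfl⟩
    simp [PySem.Str.len_eq]
  omega

-- The cums loop appends the running prefix sums.
theorem btCumsLoop_eq (rev : List String) : ∀ (t : Int) (c : List Int),
    btCumsLoop rev t c = c ++ (List.range rev.length).map (fun i => t + btSum rev (i + 1)) := by
  induction rev with
  | nil => intro t c; simp [btCumsLoop]
  | cons a l ih =>
    intro t c
    rw [btCumsLoop, ih, List.length_cons, List.range_succ_eq_map, List.map_cons, List.map_map,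
      List.append_assoc, List.singleton_append]
    congr 1
    have h0 : t + btSum (a :: l) (0 + 1) = t + PySem.Str.len a := by simp [btSum]
    rw [h0]
    congr 1
    apply List.map_congr_left
    intro i _
    simp only [Function.comp_apply, btSum_cons]
    ring

theorem btCums_getD (rev : List String) (k : Nat) (hk : k ≤ rev.length) :
    (btCumsLoop rev 0 [0]).getD k 0 = btSum rev k := by
  rw [btCumsLoop_eq, List.singleton_append]
  cases k with
  | zero => simp [btSum]
  | succ j =>
    rw [List.getD_cons_succ, List.getD_eq_getElem?_getD, List.getElem?_map,
      List.getElem?_range (by omega : j < rev.length)]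
    simp

theorem btKeep_le (rev : List String) (maxL : Int) : ∀ t, btKeep rev maxL t ≤ rev.length := by
  induction rev with
  | nil => intro t; simp [btKeep]
  | cons a l ih =>
    intro t
    rw [btKeep]
    split_ifs
    · simp
    · have := ih (t + PySem.Str.len a)
      simp only [List.length_cons, PySem.Str.len_eq] at *
      omega

theorem btKeep_sum_le (rev : List String) (maxL : Int) :
    ∀ t, 0 < btKeep rev maxL t → t + btSum rev (btKeep rev maxL t) ≤ maxL := by
  induction rev with
  | nil => intro t h; simp [btKeep] at h
  | cons a l ih =>
    intro t h
    rw [btKeep] at h ⊢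
    split_ifs at h ⊢ with hov
    · omega
    · rw [Nat.add_comm 1, btSum_cons]
      rcases Nat.eq_zero_or_pos (btKeep l maxL (t + PySem.Str.len a)) with h0 | hpos
      · rw [h0, btSum_zero]; omega
      · have := ih (t + PySem.Str.len a) hpos
        omega

theorem btKeep_sum_gt (rev : List String) (maxL : Int) :
    ∀ t, btKeep rev maxL t < rev.length → maxL < t + btSum rev (btKeep rev maxL t + 1) := by
  induction rev with
  | nil => intro t h; simp [btKeep] at h
  | cons a l ih =>
    intro t h
    rw [btKeep] at h ⊢
    split_ifs at h ⊢ with hov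
    · rw [btSum_cons, btSum_zero]; omega
    · rw [Nat.add_comm 1, Nat.add_assoc, btSum_cons]
      have hlt : btKeep l maxL (t + PySem.Str.len a) < l.length := by
        simp only [List.length_cons, PySem.Str.len_eq] at *
        omega
      have := ih (t + PySem.Str.len a) hlt
      omega

-- The binary search over the prefix sums returns exactly A's break count.
theorem btSearch_eq (rev : List String) (maxL : Int) :
    ∀ (d lo hi : Nat), hi - lo ≤ d →
      lo ≤ btKeep rev maxL 0 → btKeep rev maxL 0 ≤ hi → hi ≤ rev.length →
      btSearch (btCumsLoop rev 0 [0]) maxL lo hi = btKeep rev maxL 0 := by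
  intro d
  induction d with
  | zero =>
    intro lo hi hd hlo hhi _
    rw [btSearch, if_neg (by omega)]
    omega
  | succ d ih =>
    intro lo hi hd hlo hhi hn
    by_cases hlh : lo < hi
    · rw [btSearch, if_pos hlh]
      have hmid1 : lo < (lo + hi + 1) / 2 := by omega
      have hmid2 : (lo + hi + 1) / 2 ≤ hi := by omega
      have hgd : (btCumsLoop rev 0 [0]).getD ((lo + hi + 1) / 2) 0
          = btSum rev ((lo + hi + 1) / 2) := btCums_getD rev _ (by omega)
      by_cases hc : btSum rev ((lo + hi + 1) / 2) ≤ maxL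
      · rw [if_pos (by rw [hgd]; exact hc)]
        have hmk : (lo + hi + 1) / 2 ≤ btKeep rev maxL 0 := by
          by_contra hgt
          have hK : btKeep rev maxL 0 < rev.length := by omega
          have h1 := btKeep_sum_gt rev maxL 0 hK
          have h2 : btSum rev (btKeep rev maxL 0 + 1) ≤ btSum rev ((lo + hi + 1) / 2) :=
            btSum_mono rev (by omega)
          omega
        exact ih _ hi (by omega) hmk hhi hn
      · rw [if_neg (by rw [hgd]; exact hc)]
        have hmk : btKeep rev maxL 0 ≤ (lo + hi + 1) / 2 - 1 := by
          by_contra hgt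
          have hpos : 0 < btKeep rev maxL 0 := by omega
          have h1 := btKeep_sum_le rev maxL 0 hpos
          have h2 : btSum rev ((lo + hi + 1) / 2) ≤ btSum rev (btKeep rev maxL 0) :=
            btSum_mono rev (by omega)
          omega
        exact ih lo _ (by omega) hlo hmk (by omega)
    · rw [btSearch, if_neg hlh]
      omega

-- Zeta-reduced form of B's port (the let-bindings written out).
theorem alt_eq (messages : List (List (String × String))) (max_length : Int) :
    build_transcript_py_alt messages max_length =
      PySem.Str.join "\n" ((messages.map btFormatLine).drop ((messages.map btFormatLine).length -
        btSearch (btCumsLoop (messages.map btFormatLine).reverse 0 [0]) max_length 0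
          (messages.map btFormatLine).length)) := rfl

-- ===== VERDICT (by name: the statement is the Claim_ definition above) =====
theorem build_transcript_py_spec : Claim_equal_build_transcript_py := by
  intro messages max_length _
  unfold Spec_build_transcript_py build_transcript_py
  rw [alt_eq, btLoopA_eq]
  have hrev : (messages.reverse.map btFormatLine) = (messages.map btFormatLine).reverse := by
    simp
  set lines := messages.map btFormatLine with hl
  have hK := btKeep_le lines.reverse max_length 0
  rw [hrev]
  rw [btSearch_eq lines.reverse max_length lines.length 0 lines.length (by omega) (by omega)
    (by simpa using hK) (by simp)]
  congr 1
  rw [List.append_nil, List.map_take, hrev, ← List.rtake_eq_reverse_take_reverse, List.rtake]
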